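-- pv_equiv track=rewrite | github.com/Aayushbahadurpradhan/Doc_writer | backend/detect_apis.py | _remove_strings
-- ===== SOURCE A (Python) =====
-- from typing import Dict, List, Optional, Set, Tuple
--
-- def _remove_strings(text: str) -> str:
--     """Replace string *contents* with spaces so brace/bracket counting is safe."""
--     result: List[str] = []
--     in_str = False
--     str_ch = ""
--     escape_next = False
--     for c in text:
--         if escape_next:
--             result.append(" ")
--             escape_next = False
--             continue
--         if in_str:
--             if c == "\\":
--                 escape_next = True
--                 result.append(" ")
--             elif c == str_ch:
--                 in_str = False
--                 result.append(c)
--             else: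
--                 result.append(" ")
--         elif c in ('"', "'"):
--             in_str = True
--             str_ch = c
--             result.append(c)
--         else:
--             result.append(c)
--     return "".join(result)
-- ===== SOURCE B (Python) =====
-- def _remove_strings(text: str) -> str:
--     """Replace string *contents* with spaces so brace/bracket counting is safe."""
--     out = []
--     i = 0
--     n = len(text)
--     while i < n:
--         c = text[i]
--         out.append(c)
--         i += 1
--         if c in ('"', "'"):
--             # consume the string body, blanking it
--             while i < n:
--                 d = text[i]
--                 if d == "\\":
--                     out.append(" ")
--                     i += 1
--                     if i < n:
--                         out.append(" ")
--                         i += 1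
--                 elif d == c:
--                     out.append(d)
--                     i += 1
--                     break
--                 else:
--                     out.append(" ")
--                     i += 1
--     return "".join(out)
-- ===== Notes on version B (the rewrite author's own statement) =====
-- stated objective: alternative
-- what changed: Replaces A's single pass driven by in_str/str_ch/escape_next state flags with an index-based outer loop plus a dedicated inner loop that consumes each quoted string body (handling backslash escapes by skipping two characters), so no boolean state survives across iterations.
import Mathlib
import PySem

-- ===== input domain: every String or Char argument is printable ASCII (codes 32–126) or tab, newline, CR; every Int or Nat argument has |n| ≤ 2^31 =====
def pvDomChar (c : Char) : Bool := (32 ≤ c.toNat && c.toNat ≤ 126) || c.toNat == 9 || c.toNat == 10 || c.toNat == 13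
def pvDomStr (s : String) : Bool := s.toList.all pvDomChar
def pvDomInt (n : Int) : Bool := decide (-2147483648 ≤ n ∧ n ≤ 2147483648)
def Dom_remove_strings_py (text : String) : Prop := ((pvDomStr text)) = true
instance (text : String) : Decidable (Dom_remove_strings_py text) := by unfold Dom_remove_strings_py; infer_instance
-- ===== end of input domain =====

-- B replaces A's one-pass state machine (flags in_str/escape_next) by an index-sweep with a
-- dedicated inner loop that consumes a whole string body at once (objective: simpler decomposition).

-- ===== PORT A =====
-- A's for-loop state: (result, in_str, str_ch, escape_next); Python's str_ch starts as "" which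
-- never equals a one-char string, modelled exactly by Option Char with none as the initial value.
def aStep (st : List Char × Bool × Option Char × Bool) (c : Char) : List Char × Bool × Option Char × Bool :=
  match st with
  | (res, in_str, str_ch, escape_next) =>
    if escape_next then (res ++ [' '], in_str, str_ch, false)
    else if in_str then
      if c = '\\' then (res ++ [' '], in_str, str_ch, true)
      else if some c = str_ch then (res ++ [c], false, str_ch, false)
      else (res ++ [' '], in_str, str_ch, false)
    else if c = '"' ∨ c = '\'' then (res ++ [c], true, some c, false)
    else (res ++ [c], in_str, str_ch, false)

def remove_strings_py (text : String) : String :=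
  String.ofList (text.toList.foldl aStep ([], false, none, false)).1

-- ===== PORT B =====
-- Source B's outer while-loop / inner string-body while-loop, as mutual recursion over the char list.
mutual
def bGo : List Char → List Char
  | [] => []
  | c :: rest =>
    if c = '"' ∨ c = '\'' then c :: bInner c rest
    else c :: bGo rest
  termination_by cs => cs.length
def bInner (q : Char) : List Char → List Char
  | [] => []
  | d :: rest =>
    if d = '\\' then
      match rest with
      | [] => [' ']
      | _ :: rest2 => ' ' :: ' ' :: bInner q rest2
    else if d = q then d :: bGo rest
    else ' ' :: bInner q rest
  termination_by cs => cs.length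
  decreasing_by all_goals (simp_all; try omega)
end

def remove_strings_py_alt (text : String) : String :=
  String.ofList (bGo text.toList)

-- ===== PRECONDITION & SPEC =====
def Spec_remove_strings_py (text : String) (out : String) : Prop := out = remove_strings_py_alt text
instance (text : String) (out : String) : Decidable (Spec_remove_strings_py text out) := by unfold Spec_remove_strings_py; infer_instance

-- ===== CLAIM (what is proved, stated in full; the proofs are below) =====
def Claim_equal_remove_strings_py : Prop := ∀ (text : String), Dom_remove_strings_py text → Spec_remove_strings_py text (remove_strings_py text)

-- ===== LEMMAS AND PROOFS =====

-- A's loop, written as direct recursion on the remaining characters.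
def aRun : List Char → Bool → Option Char → Bool → List Char
  | [], _, _, _ => []
  | c :: rest, in_str, str_ch, escape_next =>
    if escape_next then ' ' :: aRun rest in_str str_ch false
    else if in_str then
      if c = '\\' then ' ' :: aRun rest in_str str_ch true
      else if some c = str_ch then c :: aRun rest false str_ch false
      else ' ' :: aRun rest in_str str_ch false
    else if c = '"' ∨ c = '\'' then c :: aRun rest true (some c) false
    else c :: aRun rest in_str str_ch false

theorem foldl_aStep_eq (cs : List Char) : ∀ (res : List Char) (i : Bool) (q : Option Char) (e : Bool),
    (cs.foldl aStep (res, i, q, e)).1 = res ++ aRun cs i q e := by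
  induction cs with
  | nil => intro res i q e; simp [aRun]
  | cons c rest ih =>
    intro res i q e
    simp only [List.foldl, aStep, aRun]
    split_ifs <;> simp [ih]

theorem aRun_eq_b : ∀ (n : ℕ) (cs : List Char), cs.length ≤ n →
    (∀ q, aRun cs false q false = bGo cs) ∧ (∀ q, aRun cs true (some q) false = bInner q cs) := by
  intro n
  induction n with
  | zero =>
    intro cs h
    have : cs = [] := by cases cs <;> simp_all
    subst this; simp [aRun, bGo, bInner]
  | succ n ih =>
    intro cs h
    cases cs with
    | nil => simp [aRun, bGo, bInner]
    | cons c rest =>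
      simp only [List.length_cons] at h
      have hr : rest.length ≤ n := by omega
      constructor
      · intro q
        by_cases hq : c = '"' ∨ c = '\''
        · simp [aRun, bGo, hq, (ih rest hr).2 c]
        · simp [aRun, bGo, hq, (ih rest hr).1 q]
      · intro q
        by_cases hb : c = '\\'
        · subst hb
          cases rest with
          | nil => simp [aRun, bInner]
          | cons d rest2 =>
            have hr2 : rest2.length ≤ n := by simp at h ⊢; omega
            simp [aRun, bInner, (ih rest2 hr2).2 q]
        · by_cases hc : c = q
          · subst hc
            rw [bInner.eq_def]
            simp [aRun, hb, (ih rest hr).1 (some c)]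
          · have hsc : ¬ (some c = some q) := by simp [hc]
            rw [bInner.eq_def]
            simp [aRun, hb, hc, hsc, (ih rest hr).2 q]

-- ===== VERDICT (by name: the statement is the Claim_ definition above) =====
theorem remove_strings_py_spec : Claim_equal_remove_strings_py := by
  intro text _
  unfold Spec_remove_strings_py remove_strings_py remove_strings_py_alt
  rw [foldl_aStep_eq]
  rw [(aRun_eq_b text.toList.length text.toList le_rfl).1 none]
  simp
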